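-- pv_equiv track=rewrite | github.com/TherenceEspoir/no_three_in_line | lib/voisinUtils.py | generation_voisins
-- ===== SOURCE A (Python) =====
-- def generation_voisins(N):
--   """
--   Renvoie un tableau de vecteurs des mouvements possibles pour générer TOUS les voisins
--   N, la taille de la matrice
--   """
--   tab = []
--
--   vect = ()
--
--   for a in range(N):
--     i = a
--     for b in range(N):
--       j = b
--
--       for c in range(N):
--         new_i = c
--         for d in range(N):
--           new_j = d
--
--           vect = (i, j, new_i, new_j)
--           if i == new_i and j == new_j:
--             continue
--           else:
--             tab.append(vect)
--
--   return tab, len(tab)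
-- ===== SOURCE B (Python) =====
-- def generation_voisins(N):
--   """
--   Renvoie un tableau de vecteurs des mouvements possibles pour generer TOUS les voisins
--   N, la taille de la matrice
--   """
--   cells = []
--   for i in range(N):
--     for j in range(N):
--       cells.append((i, j))
--   tab = []
--   for idx, (i, j) in enumerate(cells):
--     for (k, l) in cells[:idx] + cells[idx + 1:]:
--       tab.append((i, j, k, l))
--   return tab, len(tab)
-- ===== Notes on version B (the rewrite author's own statement) =====
-- stated objective: alternative
-- what changed: B precomputes the cell list once and, for each cell, emits pairs against the list with that cell sliced out by position (cells[:idx]+cells[idx+1:]), so no equality test or continue is needed anywhere, replacing A's four nested index loops with a per-iteration skip condition.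
import Mathlib
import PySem

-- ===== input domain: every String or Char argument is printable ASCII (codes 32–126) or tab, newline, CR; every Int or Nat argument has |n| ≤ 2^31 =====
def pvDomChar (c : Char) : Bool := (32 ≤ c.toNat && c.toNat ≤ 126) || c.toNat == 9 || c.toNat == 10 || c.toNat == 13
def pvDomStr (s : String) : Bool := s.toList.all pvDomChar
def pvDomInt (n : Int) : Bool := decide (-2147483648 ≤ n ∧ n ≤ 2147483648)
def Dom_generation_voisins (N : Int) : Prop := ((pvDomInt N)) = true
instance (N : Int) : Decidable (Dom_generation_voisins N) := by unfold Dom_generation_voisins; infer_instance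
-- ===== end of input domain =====

-- B precomputes the cell list and, per cell, slices that cell out by position (no equality test at all) instead of A's four nested loops with a continue; objective: alternative.

-- ===== PORT A =====
def generation_voisins (N : Int) : (List (Int × Int × Int × Int)) × Int :=
  let tab : List (Int × Int × Int × Int) :=
    (PySem.List.pyRange 0 N 1).foldl (fun tab a =>
      let i := a
      (PySem.List.pyRange 0 N 1).foldl (fun tab b =>
        let j := b
        (PySem.List.pyRange 0 N 1).foldl (fun tab c =>
          let new_i := c
          (PySem.List.pyRange 0 N 1).foldl (fun tab d =>
            let new_j := d
            let vect := (i, j, new_i, new_j)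
            if i = new_i ∧ j = new_j then tab  -- 'continue'
            else tab ++ [vect]) tab) tab) tab) []
  (tab, (tab.length : Int))

-- ===== PORT B =====
def generation_voisins_alt (N : Int) : (List (Int × Int × Int × Int)) × Int :=
  let cells : List (Int × Int) :=
    (PySem.List.pyRange 0 N 1).foldl (fun cells i =>
      (PySem.List.pyRange 0 N 1).foldl (fun cells j => cells ++ [(i, j)]) cells) []
  let tab : List (Int × Int × Int × Int) :=
    (PySem.List.enumerate cells).foldl (fun tab ip =>
      let idx := ip.1
      let i := ip.2.1
      let j := ip.2.2
      -- cells[:idx] + cells[idx+1:]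
      (PySem.List.slice cells none (some idx) ++ PySem.List.slice cells (some (idx + 1)) none).foldl
        (fun tab kl => tab ++ [(i, j, kl.1, kl.2)]) tab) []
  (tab, (tab.length : Int))

-- ===== PRECONDITION & SPEC =====
def Spec_generation_voisins (N : Int) (out : (List (Int × Int × Int × Int)) × Int) : Prop := out = generation_voisins_alt N
instance (N : Int) (out : (List (Int × Int × Int × Int)) × Int) : Decidable (Spec_generation_voisins N out) := by unfold Spec_generation_voisins; infer_instance

-- ===== CLAIM (what is proved, stated in full; the proofs are below) =====
def Claim_equal_generation_voisins : Prop := ∀ (N : Int), Dom_generation_voisins N → Spec_generation_voisins N (generation_voisins N)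

-- ===== LEMMAS AND PROOFS =====

theorem gv_foldl_nest {α β : Type} (l : List α) (g : α → List β)
    (F : List β → α → List β) (hF : ∀ acc x, F acc x = acc ++ g x) (acc : List β) :
    l.foldl F acc = acc ++ l.flatMap g := by
  have : F = fun acc x => acc ++ g x := funext fun acc => funext fun x => hF acc x
  rw [this]
  exact PySem.List.foldl_append_eq_flatMap _ _ _

theorem gv_foldl_map {α β : Type} (l : List α) (f : α → β) (acc : List β) :
    l.foldl (fun t x => t ++ [f x]) acc = acc ++ l.map f := by
  rw [gv_foldl_nest l (fun x => [f x]) _ (fun acc x => rfl) acc, List.map_eq_flatMap]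

-- A's fold in flatMap form over ranges
theorem gv_A_eq (N : Int) :
    (generation_voisins N).1
    = ((PySem.List.pyRange 0 N 1).flatMap (fun a => (PySem.List.pyRange 0 N 1).flatMap (fun b =>
        (PySem.List.pyRange 0 N 1).flatMap (fun c => (PySem.List.pyRange 0 N 1).flatMap (fun d =>
          if a = c ∧ b = d then [] else [(a,b,c,d)]))))) := by
  unfold generation_voisins
  set R := PySem.List.pyRange 0 N 1 with hR
  have l4 : ∀ (a b c : Int) (acc : List (Int×Int×Int×Int)),
      R.foldl (fun tab d => if a = c ∧ b = d then tab else tab ++ [(a,b,c,d)]) acc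
        = acc ++ R.flatMap (fun d => if a = c ∧ b = d then [] else [(a,b,c,d)]) :=
    fun a b c acc => gv_foldl_nest R _ _ (fun acc d => by split <;> simp) acc
  have l3 : ∀ (a b : Int) (acc : List (Int×Int×Int×Int)),
      R.foldl (fun tab c => R.foldl (fun tab d => if a = c ∧ b = d then tab else tab ++ [(a,b,c,d)]) tab) acc
        = acc ++ R.flatMap (fun c => R.flatMap (fun d => if a = c ∧ b = d then [] else [(a,b,c,d)])) :=
    fun a b acc => gv_foldl_nest R _ _ (fun acc c => l4 a b c acc) acc
  have l2 : ∀ (a : Int) (acc : List (Int×Int×Int×Int)),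
      R.foldl (fun tab b => R.foldl (fun tab c => R.foldl (fun tab d => if a = c ∧ b = d then tab else tab ++ [(a,b,c,d)]) tab) tab) acc
        = acc ++ R.flatMap (fun b => R.flatMap (fun c => R.flatMap (fun d => if a = c ∧ b = d then [] else [(a,b,c,d)]))) :=
    fun a acc => gv_foldl_nest R _ _ (fun acc b => l3 a b acc) acc
  have hA := gv_foldl_nest R _ _ (fun acc a => l2 a acc) []
  simpa using hA

-- B's cell list in flatMap form
theorem gv_cells_eq (N : Int) :
    ((PySem.List.pyRange 0 N 1).foldl (fun cells i =>
      (PySem.List.pyRange 0 N 1).foldl (fun cells j => cells ++ [(i, j)]) cells) [])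
    = (PySem.List.pyRange 0 N 1).flatMap (fun i => (PySem.List.pyRange 0 N 1).map (fun j => (i, j))) := by
  set R := PySem.List.pyRange 0 N 1 with hR
  have l1 : ∀ (i : Int) (acc : List (Int × Int)),
      R.foldl (fun cells j => cells ++ [(i, j)]) acc = acc ++ R.map (fun j => (i, j)) := by
    intro i acc
    exact gv_foldl_map R (fun j => (i, j)) acc
  have := gv_foldl_nest R (fun i => R.map (fun j => (i, j))) _ (fun acc i => l1 i acc) []
  simpa using this

theorem gv_cells_nodup (N : Int) :
    ((PySem.List.pyRange 0 N 1).flatMap (fun i => (PySem.List.pyRange 0 N 1).map (fun j => (i, j)))).Nodup := by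
  have : ((PySem.List.pyRange 0 N 1).flatMap (fun i => (PySem.List.pyRange 0 N 1).map (fun j => (i, j))))
      = (PySem.List.pyRange 0 N 1) ×ˢ (PySem.List.pyRange 0 N 1) := rfl
  rw [this]
  exact List.Nodup.product (PySem.List.nodup_pyRange_one 0 N) (PySem.List.nodup_pyRange_one 0 N)

theorem gv_flatMap_congr {α β : Type} (l : List α) (f g : α → List β)
    (h : ∀ x ∈ l, f x = g x) : l.flatMap f = l.flatMap g := by
  induction l with
  | nil => rfl
  | cons x xs ih =>
    simp only [List.flatMap_cons]
    rw [h x (by simp), ih (fun y hy => h y (by simp [hy]))]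

theorem gv_flatMap_no_hit {α β : Type} [DecidableEq α] (l : List α) (p : α)
    (g : α → α → List β) (hp : p ∉ l) :
    l.flatMap (fun q => if p = q then [] else g p q) = l.flatMap (g p) := by
  apply gv_flatMap_congr
  intro q hq
  rw [if_neg (fun h => hp (by rw [h]; exact hq))]

-- core per-cell block: filtering p out equals slicing position k out, for nodup lists
theorem gv_block {α β : Type} [DecidableEq α] (g : α → α → β) :
    ∀ (l : List α) (k : Nat) (p : α), l.Nodup → l[k]? = some p →
    l.flatMap (fun q => if p = q then [] else [g p q]) = (l.take k ++ l.drop (k+1)).map (g p) := by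
  intro l
  induction l with
  | nil => intro k p _ h; simp at h
  | cons x xs ih =>
    intro k p hnd hk
    cases k with
    | zero =>
      simp only [List.getElem?_cons_zero, Option.some.injEq] at hk
      subst hk
      have hpx : x ∉ xs := (List.nodup_cons.mp hnd).1
      simp only [List.flatMap_cons, List.nil_append, List.take_zero,
        List.drop_succ_cons, List.drop_zero]
      rw [if_pos trivial, List.nil_append, gv_flatMap_no_hit xs x (fun p q => [g p q]) hpx,
        ← List.map_eq_flatMap]
    | succ k =>
      simp only [List.getElem?_cons_succ] at hk
      have hmem : p ∈ xs := List.mem_of_getElem? hk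
      have hne : p ≠ x := fun h => (List.nodup_cons.mp hnd).1 (h ▸ hmem)
      simp only [List.flatMap_cons, List.take_succ_cons, List.drop_succ_cons, List.cons_append,
        List.map_cons]
      rw [if_neg hne, ih k p (List.nodup_cons.mp hnd).2 hk]
      rfl

theorem gv_mem_enumerate {α : Type} :
    ∀ (l : List α) (s : Int) (x : Int × α), x ∈ PySem.List.enumerate l s →
      ∃ k : Nat, x.1 = s + k ∧ l[k]? = some x.2 := by
  intro l
  induction l with
  | nil => intro s x h; simp [PySem.List.enumerate] at h
  | cons y ys ih =>
    intro s x h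
    rw [PySem.List.enumerate_cons] at h
    rcases List.mem_cons.mp h with h | h
    · exact ⟨0, by simp [h]⟩
    · obtain ⟨k, hk1, hk2⟩ := ih (s+1) x h
      exact ⟨k+1, by push_cast; omega, by simpa using hk2⟩

theorem gv_flatMap_enumerate_snd {α β : Type} :
    ∀ (l : List α) (s : Int) (h : α → List β),
      (PySem.List.enumerate l s).flatMap (fun ip => h ip.2) = l.flatMap h := by
  intro l
  induction l with
  | nil => intro s h; rfl
  | cons y ys ih =>
    intro s h
    rw [PySem.List.enumerate_cons]
    simp only [List.flatMap_cons, ih (s+1) h]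

-- ===== VERDICT (by name: the statement is the Claim_ definition above) =====
theorem generation_voisins_spec : Claim_equal_generation_voisins := by
  intro N _
  unfold Spec_generation_voisins
  set R := PySem.List.pyRange 0 N 1 with hR
  set cells : List (Int × Int) := R.flatMap (fun i => R.map (fun j => (i, j))) with hcells
  have hnd : cells.Nodup := gv_cells_nodup N
  -- B's tab
  have hBcells : (R.foldl (fun cs i => R.foldl (fun cs j => cs ++ [(i, j)]) cs) []) = cells :=
    gv_cells_eq N
  have hBtab :
      ((PySem.List.enumerate cells).foldl (fun tab ip =>
        (PySem.List.slice cells none (some ip.1) ++ PySem.List.slice cells (some (ip.1 + 1)) none).foldl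
          (fun tab kl => tab ++ [(ip.2.1, ip.2.2, kl.1, kl.2)]) tab) [])
      = (PySem.List.enumerate cells).flatMap (fun ip =>
          (PySem.List.slice cells none (some ip.1) ++ PySem.List.slice cells (some (ip.1 + 1)) none).map
            (fun kl => (ip.2.1, ip.2.2, kl.1, kl.2))) := by
    have := gv_foldl_nest (PySem.List.enumerate cells)
      (fun ip => (PySem.List.slice cells none (some ip.1) ++ PySem.List.slice cells (some (ip.1 + 1)) none).map
        (fun kl => (ip.2.1, ip.2.2, kl.1, kl.2)))
      _ (fun acc ip =>
        gv_foldl_map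
          (PySem.List.slice cells none (some ip.1) ++ PySem.List.slice cells (some (ip.1 + 1)) none)
          (fun kl => (ip.2.1, ip.2.2, kl.1, kl.2)) acc) []
    simpa using this
  -- the flatMap over enumerate equals the pairwise filtered flatMap over cells
  have hmain :
      (PySem.List.enumerate cells).flatMap (fun ip =>
          (PySem.List.slice cells none (some ip.1) ++ PySem.List.slice cells (some (ip.1 + 1)) none).map
            (fun kl => (ip.2.1, ip.2.2, kl.1, kl.2)))
      = cells.flatMap (fun p => cells.flatMap (fun q =>
          if p = q then [] else [(p.1, p.2, q.1, q.2)])) := by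
    rw [← gv_flatMap_enumerate_snd cells 0
      (fun p => cells.flatMap (fun q => if p = q then [] else [(p.1, p.2, q.1, q.2)]))]
    apply gv_flatMap_congr
    intro ip hip
    obtain ⟨k, hk1, hk2⟩ := gv_mem_enumerate cells 0 ip hip
    rw [hk1]
    simp only [zero_add]
    rw [PySem.List.slice_to_natCast]
    have h1 : ((k : Int) + 1) = ((k + 1 : Nat) : Int) := by push_cast; ring
    rw [h1, PySem.List.slice_from_natCast]
    exact ((gv_block (fun p q => (p.1, p.2, q.1, q.2)) cells k ip.2 hnd hk2).symm)
  -- A's tab equals the same pairwise filtered flatMap over cells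
  have hAtab : (generation_voisins N).1
      = cells.flatMap (fun p => cells.flatMap (fun q =>
          if p = q then [] else [(p.1, p.2, q.1, q.2)])) := by
    rw [gv_A_eq N]
    rw [hcells]
    simp only [List.flatMap_assoc, List.flatMap_map, ← hR]
    apply gv_flatMap_congr; intro a _
    apply gv_flatMap_congr; intro b _
    apply gv_flatMap_congr; intro c _
    apply gv_flatMap_congr; intro d _
    by_cases h : a = c ∧ b = d
    · rw [if_pos h, if_pos (by simp [h.1, h.2])]
    · rw [if_neg h, if_neg (by simp [Prod.ext_iff]; tauto)]
  -- assemble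
  show generation_voisins N = generation_voisins_alt N
  unfold generation_voisins_alt
  simp only [hBcells, ← hR]
  rw [hBtab, hmain]
  have : generation_voisins N = ((generation_voisins N).1, ((generation_voisins N).1.length : Int)) := by
    unfold generation_voisins; rfl
  rw [this, hAtab]
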